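-- pv_equiv track=rewrite | github.com/ExoticAura/Chatbot-Design | Python Backend/buttons.py | _should_hide_sources
-- ===== SOURCE A (Python) =====
-- def _should_hide_sources(answer_text: str) -> bool:
--     """
--     Returns True if the bot's answer indicates no relevant PDF info was found.
--     """
--     text = answer_text.lower()
--     keywords = [
--         "i am sorry",
--         "i'm sorry",
--         "does not contain information",
--         "cannot answer your question",
--         "no relevant info",
--         "doesn't mention"
--     ]
--     return any(kw in text for kw in keywords)
-- ===== SOURCE B (Python) =====
-- def _should_hide_sources(answer_text: str) -> bool:
--     """
--     Returns True if the bot's answer indicates no relevant PDF info was found.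
--     Single left-to-right scan: at each position, check whether any keyword starts there.
--     """
--     keywords = (
--         "i am sorry",
--         "i'm sorry",
--         "does not contain information",
--         "cannot answer your question",
--         "no relevant info",
--         "doesn't mention",
--     )
--     text = answer_text.lower()
--     for i in range(len(text) + 1):
--         for kw in keywords:
--             if text.startswith(kw, i):
--                 return True
--     return False
-- ===== Notes on version B (the rewrite author's own statement) =====
-- stated objective: alternative
-- what changed: B replaces the per-keyword substring-containment loop with one left-to-right scan over positions of the lowercased text, testing at each position whether any keyword starts there.
import Mathlib
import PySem

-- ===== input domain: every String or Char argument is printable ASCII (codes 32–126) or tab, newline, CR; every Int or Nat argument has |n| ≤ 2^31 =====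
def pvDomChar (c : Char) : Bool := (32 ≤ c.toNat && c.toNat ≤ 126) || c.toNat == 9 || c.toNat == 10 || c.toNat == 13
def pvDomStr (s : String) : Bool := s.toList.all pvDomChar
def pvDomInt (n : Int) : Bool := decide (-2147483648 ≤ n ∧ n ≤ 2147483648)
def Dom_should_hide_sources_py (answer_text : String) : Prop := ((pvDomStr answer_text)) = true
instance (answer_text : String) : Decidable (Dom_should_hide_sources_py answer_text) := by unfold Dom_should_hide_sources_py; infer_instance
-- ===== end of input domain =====

-- B replaces A's per-keyword 'kw in text' substring loop with one left-to-right scan over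
-- positions of the lowercased text, testing at each position whether any keyword starts there.

-- ===== PORT A =====
def should_hide_sources_py (answer_text : String) : Bool :=
  let text := PySem.Str.lower answer_text
  let keywords : List String :=
    ["i am sorry", "i'm sorry", "does not contain information",
     "cannot answer your question", "no relevant info", "doesn't mention"]
  keywords.any (fun kw => PySem.Str.isIn kw text)

-- ===== PORT B =====
-- B's keyword tuple, as code-point lists
def pvKeywordsB : List (List Char) :=
  ["i am sorry", "i'm sorry", "does not contain information",
   "cannot answer your question", "no relevant info", "doesn't mention"].map String.toList
-- B's scan: for i in range(len(text)+1): if any kw starts at position i, return True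
def pvScanB (kws : List (List Char)) : List Char → Bool
  | [] => kws.any (fun kw => PySem.Chars.startswith [] kw)
  | c :: rest =>
      kws.any (fun kw => PySem.Chars.startswith (c :: rest) kw) || pvScanB kws rest

def should_hide_sources_py_alt (answer_text : String) : Bool :=
  let text := PySem.Str.lower answer_text
  pvScanB pvKeywordsB text.toList

-- ===== PRECONDITION & SPEC =====
def Spec_should_hide_sources_py (answer_text : String) (out : Bool) : Prop := out = should_hide_sources_py_alt answer_text
instance (answer_text : String) (out : Bool) : Decidable (Spec_should_hide_sources_py answer_text out) := by unfold Spec_should_hide_sources_py; infer_instance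

-- ===== CLAIM (what is proved, stated in full; the proofs are below) =====
def Claim_equal_should_hide_sources_py : Prop := ∀ (answer_text : String), Dom_should_hide_sources_py answer_text → Spec_should_hide_sources_py answer_text (should_hide_sources_py answer_text)

-- ===== LEMMAS AND PROOFS =====

theorem pvScanB_iff (kws : List (List Char)) (s : List Char) :
    pvScanB kws s = true ↔ ∃ kw ∈ kws, kw <:+: s := by
  induction s with
  | nil =>
      simp [pvScanB, List.any_eq_true, PySem.Chars.startswith_iff, List.prefix_nil,
        List.infix_nil]
  | cons c rest ih =>
      simp only [pvScanB, Bool.or_eq_true, List.any_eq_true, PySem.Chars.startswith_iff, ih]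
      constructor
      · rintro (⟨kw, hkw, hpre⟩ | ⟨kw, hkw, hinf⟩)
        · exact ⟨kw, hkw, hpre.isInfix⟩
        · exact ⟨kw, hkw, List.infix_cons_iff.mpr (Or.inr hinf)⟩
      · rintro ⟨kw, hkw, hinf⟩
        rcases List.infix_cons_iff.mp hinf with h | h
        · exact Or.inl ⟨kw, hkw, h⟩
        · exact Or.inr ⟨kw, hkw, h⟩

theorem pvScanB_eq_any_isIn (kws : List (List Char)) (s : List Char) :
    pvScanB kws s = kws.any (fun kw => PySem.Chars.isIn kw s) := by
  rw [Bool.eq_iff_iff, pvScanB_iff, List.any_eq_true]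
  simp [PySem.Chars.isIn_iff_infix]

-- ===== VERDICT (by name: the statement is the Claim_ definition above) =====
theorem should_hide_sources_py_spec : Claim_equal_should_hide_sources_py := by
  intro answer_text _
  unfold Spec_should_hide_sources_py should_hide_sources_py should_hide_sources_py_alt pvKeywordsB
  simp only [pvScanB_eq_any_isIn, List.any_map, Function.comp_def, PySem.Str.isIn_eq]
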